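-- pv_equiv track=rewrite | github.com/simonalanjones/python-invaders | classes/controllers/UI_controller.py | text_generator
-- ===== SOURCE A (Python) =====
-- def text_generator(text_to_display):
--     time_between_chars = 10  # Delay frames between each character
--     char_index = 0
--     frame_count = 0
--     current_text = ""
--
--     while char_index < len(text_to_display):
--         if frame_count >= time_between_chars:
--             current_text = text_to_display[: char_index + 1]
--             yield current_text
--             char_index += 1
--             frame_count = 0
--         else:
--             yield current_text  # Return the progressively increasing text during the delay
--         frame_count += 1
-- ===== SOURCE B (Python) =====
-- def text_generator(text_to_display):
--     # 10 delay frames per character: yield each proper prefix 10 times,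
--     # then the full text exactly once (nothing at all for empty input).
--     for k in range(len(text_to_display)):
--         prefix = text_to_display[:k]
--         for _ in range(10):
--             yield prefix
--     if text_to_display:
--         yield text_to_display
-- ===== Notes on version B (the rewrite author's own statement) =====
-- stated objective: simpler
-- what changed: Replaced the single while-loop state machine (char_index/frame_count/current_text mutable state) with a closed nested loop: 10 yields of each proper prefix per character, then one final full-text yield.
import Mathlib
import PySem

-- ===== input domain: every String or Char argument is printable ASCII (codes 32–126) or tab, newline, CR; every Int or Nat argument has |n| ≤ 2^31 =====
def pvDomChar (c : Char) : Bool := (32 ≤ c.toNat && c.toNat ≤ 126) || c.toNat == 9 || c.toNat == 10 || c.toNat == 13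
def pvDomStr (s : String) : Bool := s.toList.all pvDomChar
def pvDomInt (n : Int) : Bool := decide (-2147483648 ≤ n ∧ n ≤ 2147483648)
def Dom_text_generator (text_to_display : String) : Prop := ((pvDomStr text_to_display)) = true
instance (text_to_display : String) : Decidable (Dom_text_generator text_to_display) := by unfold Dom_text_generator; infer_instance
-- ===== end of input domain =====

-- B replaces A's while-loop state machine by a nested loop (10 yields per prefix, then the full text once): simpler decomposition, same cost.


-- ===== PORT A =====
-- the while loop of A: state = (char_index, frame_count, current_text); yields collected as a list
def textGenLoop (s : List Char) (ci fc : Nat) (cur : String) : List String :=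
  if _h : ci < s.length then
    if 10 ≤ fc then
      let cur' := String.ofList (PySem.List.slice s none (some ((ci : Int) + 1)))
      cur' :: textGenLoop s (ci + 1) (0 + 1) cur'
    else
      cur :: textGenLoop s ci (fc + 1) cur
  else []
termination_by (s.length - ci) * 11 + (10 - fc)
decreasing_by all_goals omega

def text_generator (text_to_display : String) : List String :=
  textGenLoop text_to_display.toList 0 0 ""

-- ===== PORT B =====
def text_generator_alt (text_to_display : String) : List String :=
  ((List.range text_to_display.toList.length).flatMap
      (fun (k : Nat) => List.replicate 10 (String.ofList (PySem.List.slice text_to_display.toList none (some (k : Int))))))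
    ++ (if text_to_display.toList ≠ [] then [text_to_display] else [])

-- ===== PRECONDITION & SPEC =====
def Spec_text_generator (text_to_display : String) (out : List String) : Prop := out = text_generator_alt text_to_display
instance (text_to_display : String) (out : List String) : Decidable (Spec_text_generator text_to_display out) := by unfold Spec_text_generator; infer_instance

-- ===== CLAIM (what is proved, stated in full; the proofs are below) =====
def Claim_equal_text_generator : Prop := ∀ (text_to_display : String), Dom_text_generator text_to_display → Spec_text_generator text_to_display (text_generator text_to_display)

-- ===== LEMMAS AND PROOFS =====

-- after yielding prefix k once, the loop yields it (10 - fc) more times, then advances to prefix k+1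
theorem textGenLoop_phase (s : List Char) (k fc : Nat) (hk : k < s.length) (hfc : fc ≤ 10) :
    textGenLoop s k fc (String.ofList (s.take k)) =
      List.replicate (10 - fc) (String.ofList (s.take k))
        ++ String.ofList (s.take (k + 1)) :: textGenLoop s (k + 1) 1 (String.ofList (s.take (k + 1))) := by
  induction' h : 10 - fc with m ih generalizing fc
  · have hfc10 : fc = 10 := by omega
    subst hfc10
    rw [textGenLoop]
    simp only [hk, dif_pos, if_pos (le_refl 10)]
    have : PySem.List.slice s none (some ((k : Int) + 1)) = s.take (k + 1) := by
      have := PySem.List.slice_to_natCast s (k + 1)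
      simpa using this
    simp [this]
  · have hfc' : fc < 10 := by omega
    rw [textGenLoop]
    simp only [hk, dif_pos, if_neg (by omega : ¬ 10 ≤ fc)]
    rw [ih (fc + 1) (by omega) (by omega)]
    simp [List.replicate_succ]

-- main invariant: one already-emitted copy of prefix k followed by the rest of the loop
theorem textGenLoop_main (s : List Char) (k : Nat) (hk : k ≤ s.length) :
    String.ofList (s.take k) :: textGenLoop s k 1 (String.ofList (s.take k)) =
      ((List.range' k (s.length - k)).flatMap (fun j => List.replicate 10 (String.ofList (s.take j))))
        ++ [String.ofList (s.take s.length)] := by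
  induction' h : s.length - k with m ih generalizing k
  · have hk' : k = s.length := by omega
    subst hk'
    rw [textGenLoop]
    simp
  · have hk' : k < s.length := by omega
    rw [textGenLoop_phase s k 1 hk' (by omega)]
    rw [ih (k + 1) (by omega) (by omega)]
    rw [List.range'_succ]
    simp [List.replicate_succ]

theorem text_generator_spec : Claim_equal_text_generator := by
  intro t _
  unfold Spec_text_generator text_generator text_generator_alt
  set s := t.toList with hs
  by_cases hn : s = []
  · rw [textGenLoop]
    simp [hn]
  · have hlen : 0 < s.length := List.length_pos_iff.mpr hn
    have step : textGenLoop s 0 0 "" = "" :: textGenLoop s 0 1 "" := by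
      rw [textGenLoop]
      simp [hlen]
    have hemp : ("" : String) = String.ofList (s.take 0) := by simp
    rw [step, hemp, textGenLoop_main s 0 (by omega)]
    have hslice : ∀ k : Nat, PySem.List.slice s none (some (k : Int)) = s.take k := by
      intro k
      simpa using PySem.List.slice_to_natCast s k
    have hfull : String.ofList (s.take s.length) = t := by
      rw [List.take_length, hs, String.ofList_toList]
    rw [show (fun k : Nat => List.replicate 10 (String.ofList (PySem.List.slice s none (some (k : Int)))))
          = (fun k : Nat => List.replicate 10 (String.ofList (s.take k))) from funext fun k => by rw [hslice]]
    simp only [Nat.sub_zero, List.range_eq_range', hfull, hn, ne_eq, not_false_iff, if_pos]
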